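-- pv_equiv track=rewrite | github.com/GHkar/Algorithm | programmers/implementation/53-twoDownBit.py | solution
-- ===== SOURCE A (Python) =====
-- def solution(numbers):
--     answer = []
--     for number in numbers:
--         if number % 2 == 0 : answer.append(number + 1)
--         else :
--             change = f'0{bin(number)[2::]}'
--             i = change.rindex('0')
--             lc = list(change)
--             lc[i], lc[i+1] = '1', '0'
--             answer.append(int(''.join(lc), 2))
--
--     return answer
-- ===== SOURCE B (Python) =====
-- def solution(numbers):
--     answer = []
--     for n in numbers:
--         if n % 2 == 0:
--             answer.append(n + 1)
--         else:
--             m, t = n, 0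
--             while m % 2 == 1:
--                 m //= 2
--                 t += 1
--             answer.append(n + (1 << (t - 1)))
--     return answer
-- ===== Notes on version B (the rewrite author's own statement) =====
-- stated objective: alternative
-- what changed: Replaces A's per-element binary-string build (f-string, rindex, list surgery, int(...,2) parse) by pure integer arithmetic (divide out the trailing one-bits, add the matching power of two); Pre_ excludes lists containing a negative odd number, where A's slicing of bin(n) drops the minus sign so its value is an artefact of the string construction.
-- outside the precondition, e.g. on solution([-3]): A returns [11], B returns [-2]
import Mathlib
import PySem

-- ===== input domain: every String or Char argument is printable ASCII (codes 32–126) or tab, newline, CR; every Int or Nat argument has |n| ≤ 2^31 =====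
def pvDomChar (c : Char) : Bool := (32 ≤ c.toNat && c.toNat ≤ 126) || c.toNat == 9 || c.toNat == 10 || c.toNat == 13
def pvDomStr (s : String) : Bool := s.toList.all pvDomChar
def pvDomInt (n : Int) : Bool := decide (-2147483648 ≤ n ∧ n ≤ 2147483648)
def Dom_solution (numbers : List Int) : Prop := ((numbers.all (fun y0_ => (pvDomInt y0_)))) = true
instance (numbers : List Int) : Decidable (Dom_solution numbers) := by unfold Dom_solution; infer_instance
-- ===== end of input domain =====

-- B replaces A's build/parse of a binary string by integer arithmetic (divide out the trailing
-- one-bits of an odd number and add the matching power of two); objective: alternative.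

-- ===== PORT A =====
-- int(''.join(lc), 2), hand-ported: exact on every string A builds here — an optional '0b' prefix
-- followed by nonempty binary digits, no sign/whitespace/underscore (Python accepts a '0b' prefix
-- when the base is 2, and A's strings contain only '0', '1' and that prefix's 'b').
def pvParseBin (cs : List Char) : Int :=
  (match cs with
    | '0' :: 'b' :: r => r
    | r => r).foldl (fun a c => 2 * a + (if c = '1' then 1 else 0)) 0

-- one iteration of A's loop body
def pvStepA (n : Int) : Int :=
  if PySem.Int.mod n 2 = 0 then n + 1
  else
    -- change = f'0{bin(number)[2::]}'
    let change : List Char := '0' :: PySem.List.slice (PySem.Int.toBinChars0b n) (some 2) none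
    -- i = change.rindex('0'): '0' is change's head, so rindex = rfind and the result is ≥ 0
    let i : Nat := (PySem.Chars.rfind change ['0']).toNat
    -- lc[i], lc[i+1] = '1', '0'
    let lc : List Char := (change.set i '1').set (i + 1) '0'
    pvParseBin lc

def solution (numbers : List Int) : List Int :=
  numbers.foldl (fun answer n => answer ++ [pvStepA n]) []

-- ===== PORT B =====
-- Source B's while-loop 'while m % 2 == 1: m //= 2; t += 1', with a fuel argument only to make the
-- transcription total (64 iterations are more than enough for any |n| ≤ 2^31 admitted by Dom)
def pvStripF : Nat → Int → Nat → Int × Nat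
  | 0, m, t => (m, t)
  | f + 1, m, t =>
      if PySem.Int.mod m 2 = 1 then pvStripF f (PySem.Int.floordiv m 2) (t + 1) else (m, t)

-- one iteration of Source B's loop body
def pvStepB (n : Int) : Int :=
  if PySem.Int.mod n 2 = 0 then n + 1
  else
    let p := pvStripF 64 n 0
    n + ((1 <<< (p.2 - 1) : Nat) : Int)      -- n + (1 << (t - 1))

def solution_alt (numbers : List Int) : List Int :=
  numbers.foldl (fun answer n => answer ++ [pvStepB n]) []

-- ===== PRECONDITION & SPEC =====
-- Pre_ excludes lists containing a negative odd number: there A's slicing of bin(n) drops the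
-- minus sign (and can even hit the kept '0b' prefix), so A's value is an artefact of the string
-- construction rather than a value of the function's purpose.
def Pre_solution (numbers : List Int) : Prop := ∀ n ∈ numbers, 0 ≤ n ∨ n % 2 = 0
instance (numbers : List Int) : Decidable (Pre_solution numbers) := by unfold Pre_solution; infer_instance
def pvWitness_solution : List Int := [0, 1, 6, 11, -4]

def Spec_solution (numbers : List Int) (out : List Int) : Prop := out = solution_alt numbers
instance (numbers : List Int) (out : List Int) : Decidable (Spec_solution numbers out) := by unfold Spec_solution; infer_instance

-- ===== CLAIM (what is proved, stated in full; the proofs are below) =====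
def Claim_equal_solution : Prop := ∀ (numbers : List Int), Dom_solution numbers → Pre_solution numbers → Spec_solution numbers (solution numbers)

-- ===== LEMMAS AND PROOFS =====

-- binary digits of y, most significant first (the digits of bin(y) for y ≥ 1)
def bitsN (y : Nat) : List Char :=
  if h : y = 0 then [] else bitsN (y / 2) ++ [if y % 2 = 1 then '1' else '0']
decreasing_by exact Nat.div_lt_self (by omega) (by omega)

-- the value a list of binary digits denotes
def val2 (cs : List Char) : Nat :=
  cs.foldl (fun a c => 2 * a + (if c = '1' then 1 else 0)) 0

-- reference form of Source B's loop on a nonnegative argument, structural on Nat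
def pvStripOnes (y : Nat) : Nat × Nat :=
  if h : y % 2 = 1 then let p := pvStripOnes (y / 2); (p.1, p.2 + 1) else (y, 0)
decreasing_by exact Nat.div_lt_self (by omega) (by omega)

lemma bitsN_zero : bitsN 0 = [] := by rw [bitsN]; rfl

lemma bitsN_eq {y : Nat} (h : y ≠ 0) :
    bitsN y = bitsN (y / 2) ++ [if y % 2 = 1 then '1' else '0'] := by
  rw [bitsN, dif_neg h]

lemma val2_foldl (cs : List Char) (a : Nat) :
    cs.foldl (fun a c => 2 * a + (if c = '1' then 1 else 0)) a
      = a * 2 ^ cs.length + val2 cs := by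
  induction cs generalizing a with
  | nil => simp [val2]
  | cons c cs ih =>
    have h1 := ih (2 * a + (if c = '1' then 1 else 0))
    have h2 : val2 (c :: cs)
        = (2 * 0 + (if c = '1' then 1 else 0)) * 2 ^ cs.length + val2 cs :=
      ih (2 * 0 + (if c = '1' then 1 else 0))
    simp only [List.foldl_cons, List.length_cons]
    rw [h1, h2, pow_succ]
    ring

lemma val2_append (u v : List Char) :
    val2 (u ++ v) = val2 u * 2 ^ v.length + val2 v := by
  simp only [val2, List.foldl_append]
  exact val2_foldl v (val2 u)

lemma val2_replicate_one (t : Nat) : val2 (List.replicate t '1') = 2 ^ t - 1 := by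
  induction t with
  | zero => simp [val2]
  | succ k ih =>
    rw [List.replicate_succ', val2_append, ih]
    have h1 : (1:Nat) ≤ 2 ^ k := Nat.one_le_two_pow
    simp [val2, pow_succ]; omega

lemma val2_digit (b : Nat) (hb : b = 0 ∨ b = 1) :
    val2 [if b = 1 then '1' else '0'] = b := by
  rcases hb with h | h <;> subst h <;> rfl

lemma val2_bitsN (y : Nat) : val2 (bitsN y) = y := by
  induction y using Nat.strong_induction_on with
  | _ y ih =>
    rcases Nat.eq_zero_or_pos y with h | h
    · subst h; rw [bitsN_zero]; rfl
    · rw [bitsN_eq (by omega), val2_append,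
        ih (y / 2) (Nat.div_lt_self h (by omega))]
      rw [show val2 [if y % 2 = 1 then '1' else '0'] = y % 2 from
        val2_digit (y % 2) (by omega)]
      simp only [List.length_cons, List.length_nil]
      omega

lemma bitsN_head {y : Nat} (h : y ≠ 0) : (bitsN y).head? = some '1' := by
  induction y using Nat.strong_induction_on with
  | _ y ih =>
    rw [bitsN_eq h]
    rcases Nat.eq_zero_or_pos (y / 2) with h2 | h2
    · have hy1 : y = 1 := by omega
      subst hy1
      rw [h2, bitsN_zero]
      rfl
    · have h1 := ih (y / 2) (Nat.div_lt_self (by omega) (by omega)) (by omega)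
      cases hb : bitsN (y / 2) with
      | nil => rw [hb] at h1; simp at h1
      | cons a r =>
        rw [hb] at h1
        simp only [List.head?_cons, Option.some.injEq] at h1
        subst h1
        rfl

-- ---- Nat.toDigits 2 produces exactly bitsN ----

lemma toDigitsCore_eq (f : Nat) : ∀ (y : Nat) (ds : List Char), y ≠ 0 → y < 2 ^ f →
    Nat.toDigitsCore 2 f y ds = bitsN y ++ ds := by
  induction f with
  | zero => intro y ds h hlt; simp at hlt; omega
  | succ f ih =>
    intro y ds h hlt
    simp only [Nat.toDigitsCore]
    rcases Nat.eq_zero_or_pos (y / 2) with h2 | h2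
    · have hy1 : y = 1 := by omega
      subst hy1
      rw [bitsN_eq (by omega)]
      norm_num [bitsN_zero, Nat.digitChar]
    · have hne : ¬ (y / 2 = 0) := by omega
      simp only [hne, if_false]
      rw [ih (y / 2) _ (by omega) (by
        have h2f : 2 ^ (f + 1) = 2 ^ f * 2 := by rw [pow_succ]
        omega)]
      rw [bitsN_eq h, List.append_assoc]
      rcases Nat.mod_two_eq_zero_or_one y with h3 | h3 <;>
        simp [h3, Nat.digitChar]

lemma toDigits2_eq (y : Nat) (h : y ≠ 0) : Nat.toDigits 2 y = bitsN y := by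
  have hlt : y < 2 ^ (y + 1) := by
    have h1 : y < 2 ^ y := Nat.lt_pow_self (by omega)
    have h2 : 2 ^ y ≤ 2 ^ (y + 1) := Nat.pow_le_pow_right (by omega) (by omega)
    omega
  rw [Nat.toDigits, toDigitsCore_eq (y + 1) y [] h hlt]
  simp

-- ---- pvStripOnes: m is even, y = m·2^t + (2^t − 1), and bitsN y = bitsN m ++ '1'^t ----

lemma stripOnes_unfold_odd {y : Nat} (h : y % 2 = 1) :
    pvStripOnes y = ((pvStripOnes (y / 2)).1, (pvStripOnes (y / 2)).2 + 1) := by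
  rw [pvStripOnes, dif_pos h]

lemma stripOnes_unfold_even {y : Nat} (h : ¬ y % 2 = 1) :
    pvStripOnes y = (y, 0) := by
  rw [pvStripOnes, dif_neg h]

lemma stripOnes_spec (y : Nat) :
    (pvStripOnes y).1 % 2 = 0 ∧
    y = (pvStripOnes y).1 * 2 ^ (pvStripOnes y).2 + (2 ^ (pvStripOnes y).2 - 1) ∧
    bitsN y = bitsN (pvStripOnes y).1 ++ List.replicate (pvStripOnes y).2 '1' := by
  induction y using pvStripOnes.induct with
  | case1 y h ih =>
    rw [stripOnes_unfold_odd h]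
    obtain ⟨i1, i2, i3⟩ := ih
    refine ⟨i1, ?_, ?_⟩
    · have hp : 1 ≤ 2 ^ (pvStripOnes (y / 2)).2 := Nat.one_le_two_pow
      have hp2 : 2 ^ ((pvStripOnes (y / 2)).2 + 1) = 2 * 2 ^ (pvStripOnes (y / 2)).2 := by
        rw [pow_succ]; ring
      have e : (pvStripOnes (y / 2)).1 * 2 ^ ((pvStripOnes (y / 2)).2 + 1)
          = 2 * ((pvStripOnes (y / 2)).1 * 2 ^ (pvStripOnes (y / 2)).2) := by
        rw [hp2]; ring
      simp only []
      omega
    · simp only []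
      rw [bitsN_eq (by omega), i3, List.replicate_succ', ← List.append_assoc]
      simp [h]
  | case2 y h =>
    rw [stripOnes_unfold_even h]
    exact ⟨by omega, by simp, by simp⟩

lemma stripOnes_t_pos {y : Nat} (h : y % 2 = 1) : 1 ≤ (pvStripOnes y).2 := by
  rw [stripOnes_unfold_odd h]
  simp

-- ---- the fuelled Int loop of the port equals pvStripOnes on nonnegative arguments ----

lemma stripF_eq : ∀ (fuel y t : Nat), y < 2 ^ fuel →
    pvStripF fuel (y : Int) t = (((pvStripOnes y).1 : Int), (pvStripOnes y).2 + t) := by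
  intro fuel
  induction fuel with
  | zero =>
    intro y t hlt
    have hy0 : y = 0 := by simpa using hlt
    subst hy0
    rw [stripOnes_unfold_even (by omega)]
    simp [pvStripF]
  | succ f ih =>
    intro y t hlt
    have hmod : PySem.Int.mod (y : Int) 2 = ((y % 2 : Nat) : Int) :=
      PySem.Int.mod_natCast y 2
    by_cases h : y % 2 = 1
    · have hdiv : PySem.Int.floordiv (y : Int) 2 = ((y / 2 : Nat) : Int) :=
        PySem.Int.floordiv_natCast y 2
      rw [pvStripF, hmod, h, if_pos (by norm_num : ((1:Nat):Int) = 1)]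
      rw [hdiv,
        ih (y / 2) (t + 1) (by
          have : 2 ^ (f + 1) = 2 ^ f * 2 := by rw [pow_succ]
          omega),
        stripOnes_unfold_odd h]
      simp only []
      congr 1
      omega
    · have h0 : y % 2 = 0 := by omega
      rw [pvStripF, hmod, h0]
      norm_num
      rw [stripOnes_unfold_even h]
      simp

-- ---- rfind on a list whose last '0' is at index pre.length ----

lemma isPrefixOf_singleton (c : Char) (s : List Char) :
    ([c].isPrefixOf s) = true ↔ s.head? = some c := by
  cases s with
  | nil => simp [List.isPrefixOf]
  | cons a r =>
    simp only [List.isPrefixOf, List.head?_cons, Option.some.injEq, Bool.and_eq_true,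
      and_true, beq_iff_eq]
    exact ⟨fun h => h.symm, fun h => h.symm⟩

lemma rfind_go_eq (s : List Char) (c : Char) (i : Nat) (hi : s[i]? = some c) :
    ∀ k : Nat, i ≤ k → (∀ j, i < j → j ≤ k → s[j]? ≠ some c) →
    PySem.Chars.rfind.go s [c] k = (i : Int) := by
  intro k
  induction k with
  | zero =>
    intro hik _
    have h0 : i = 0 := by omega
    subst h0
    have hpre : ([c].isPrefixOf s) = true := by
      rw [isPrefixOf_singleton]
      rw [← List.head?_drop (l := s) (i := 0)] at hi
      simpa using hi
    rw [show PySem.Chars.rfind.go s [c] 0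
        = if [c].isPrefixOf s = true then (0 : Int) else -1 from rfl,
      if_pos hpre]
    simp
  | succ k ih =>
    intro hik hj
    rw [show PySem.Chars.rfind.go s [c] (k + 1)
        = if [c].isPrefixOf (List.drop (k + 1) s) = true then ((k + 1 : Nat) : Int)
          else PySem.Chars.rfind.go s [c] k from rfl]
    by_cases hcase : i = k + 1
    · subst hcase
      have hpre : ([c].isPrefixOf (List.drop (k + 1) s)) = true := by
        rw [isPrefixOf_singleton, List.head?_drop]
        exact hi
      rw [if_pos hpre]
      try simp
    · have hnpre : ¬ (([c].isPrefixOf (List.drop (k + 1) s)) = true) := by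
        rw [isPrefixOf_singleton, List.head?_drop]
        exact hj (k + 1) (by omega) (by omega)
      rw [if_neg hnpre]
      exact ih (by omega) (fun j h1 h2 => hj j h1 (by omega))

lemma rfind_last (pre suf : List Char) (h : '0' ∉ suf) :
    PySem.Chars.rfind (pre ++ '0' :: suf) ['0'] = (pre.length : Int) := by
  have hget : (pre ++ '0' :: suf)[pre.length]? = some '0' := by
    rw [List.getElem?_append_right (le_refl _)]
    simp
  rw [PySem.Chars.rfind]
  apply rfind_go_eq _ _ _ hget
  · simp
    try omega
  · intro j h1 h2 hcontra
    rw [List.getElem?_append_right (by omega)] at hcontra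
    have h3 : j - pre.length = (j - pre.length - 1) + 1 := by omega
    rw [h3, List.getElem?_cons_succ] at hcontra
    exact h (List.mem_of_getElem? hcontra)

-- the two assignments lc[i] = '1', lc[i+1] = '0' at i = pre.length
lemma set_swap (pre suf : List Char) :
    (((pre ++ '0' :: suf).set pre.length '1').set (pre.length + 1) '0')
      = pre ++ '1' :: suf.set 0 '0' := by
  rw [List.set_append, if_neg (by omega), Nat.sub_self, List.set_cons_zero,
      List.set_append, if_neg (by omega)]
  have h1 : pre.length + 1 - pre.length = 1 := by omega
  rw [h1]
  rfl

-- ---- evaluating pvParseBin on the shapes A produces (for nonnegative input: no '0b' prefix) ----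

lemma foldl_int_eq_val2 (cs : List Char) : ∀ (a : Nat),
    cs.foldl (fun (x : Int) c => 2 * x + (if c = '1' then 1 else 0)) ((a : Nat) : Int)
      = ((cs.foldl (fun x c => 2 * x + (if c = '1' then 1 else 0)) a : Nat) : Int) := by
  induction cs with
  | nil => intro a; simp
  | cons c cs ih =>
    intro a
    simp only [List.foldl_cons]
    rw [show (2 * ((a : Nat) : Int) + (if c = '1' then 1 else 0))
        = (((2 * a + (if c = '1' then 1 else 0) : Nat) : Nat) : Int) by
      split <;> push_cast <;> ring]
    exact ih _

lemma parseBin_one (r : List Char) : pvParseBin ('1' :: r) = (val2 ('1' :: r) : Int) := by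
  have h := foldl_int_eq_val2 ('1' :: r) 0
  rw [Nat.cast_zero] at h
  exact h

lemma parseBin_zero_one (r : List Char) :
    pvParseBin ('0' :: '1' :: r) = (val2 ('0' :: '1' :: r) : Int) := by
  have h := foldl_int_eq_val2 ('0' :: '1' :: r) 0
  rw [Nat.cast_zero] at h
  exact h

-- ---- the per-element equivalence, on the admitted inputs ----

lemma step_eq (n : Int) (hdom : -2147483648 ≤ n ∧ n ≤ 2147483648)
    (hpre : 0 ≤ n ∨ n % 2 = 0) : pvStepA n = pvStepB n := by
  by_cases hev : PySem.Int.mod n 2 = 0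
  · unfold pvStepA pvStepB
    rw [if_pos hev, if_pos hev]
  · have hodd : PySem.Int.mod n 2 = 1 := (PySem.Int.mod_two_eq n).resolve_left hev
    have hm : n % 2 = 1 := by
      rw [← PySem.Int.mod_eq_emod_of_pos (by omega : (0:Int) < 2)]
      exact hodd
    have hneg : 0 ≤ n := hpre.resolve_right (by omega)
    obtain ⟨y, hy⟩ : ∃ y : Nat, n = (y : Int) := ⟨n.toNat, by omega⟩
    subst hy
    have hyodd : y % 2 = 1 := by omega
    have hyne : y ≠ 0 := by omega
    have hylt : y < 2 ^ 64 := by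
      have : (2147483648 : Int) < (2:Int) ^ 64 := by norm_num
      omega
    obtain ⟨m, t, hmt⟩ : ∃ m t, pvStripOnes y = (m, t) := ⟨_, _, rfl⟩
    obtain ⟨hmeven, hdecomp, hbits⟩ := stripOnes_spec y
    rw [hmt] at hmeven hdecomp hbits
    simp only [] at hmeven hdecomp hbits
    have ht1 : 1 ≤ t := by
      have h1 := stripOnes_t_pos hyodd
      rw [hmt] at h1
      exact h1
    obtain ⟨k, rfl⟩ : ∃ k, t = k + 1 := ⟨t - 1, by omega⟩
    have h2k : (1:Nat) ≤ 2 ^ k := Nat.one_le_two_pow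
    have hpow : (2:Nat) ^ (k + 1) = 2 * 2 ^ k := by rw [pow_succ]; ring
    have hrep : List.replicate (k + 1) '1' = '1' :: List.replicate k '1' :=
      List.replicate_succ
    -- B's value: the loop strips the k+1 trailing one-bits, then adds 1 << k
    have hshift1 : (1 <<< (k + 1 - 1) : Nat) = 2 ^ k := by
      rw [Nat.shiftLeft_eq]; simp
    have hB : pvStepB (y : Int) = (y : Int) + ((2 ^ k : Nat) : Int) := by
      unfold pvStepB
      rw [if_neg hev, stripF_eq 64 y 0 hylt, hmt]
      simp only []
      rw [hshift1]
    -- A's change list: change = '0' :: bitsN y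
    have hchange : PySem.List.slice (PySem.Int.toBinChars0b (y : Int)) (some 2) none
        = bitsN y := by
      rw [PySem.List.slice_from (PySem.Int.toBinChars0b (y : Int)) (show (0:Int) ≤ 2 by omega)]
      simp only [PySem.Int.toBinChars0b, if_neg (show ¬ ((y:Int) < 0) by omega)]
      rw [show (y : Int).toNat = y by omega, toDigits2_eq y hyne]
      rfl
    have hA0 : pvStepA (y : Int) = pvParseBin
        ((('0' :: PySem.List.slice (PySem.Int.toBinChars0b (y:Int)) (some 2) none).set
            (PySem.Chars.rfind ('0' :: PySem.List.slice (PySem.Int.toBinChars0b (y:Int)) (some 2) none) ['0']).toNat '1').set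
          ((PySem.Chars.rfind ('0' :: PySem.List.slice (PySem.Int.toBinChars0b (y:Int)) (some 2) none) ['0']).toNat + 1) '0') := by
      unfold pvStepA
      rw [if_neg hev]
    rcases Nat.eq_zero_or_pos m with hm0 | hmpos
    · -- m = 0 : y = 2^(k+1) − 1, all ones; the swap hits change's leading '0'
      have hbits' : bitsN y = List.replicate (k + 1) '1' := by
        rw [hbits, hm0, bitsN_zero]
        rfl
      have hch : ('0' :: PySem.List.slice (PySem.Int.toBinChars0b (y:Int)) (some 2) none)
          = [] ++ '0' :: List.replicate (k + 1) '1' := by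
        rw [hchange, hbits']
        rfl
      have hA : pvStepA (y : Int) = ((2 ^ (k + 1) + (2 ^ k - 1) : Nat) : Int) := by
        rw [hA0, hch, rfind_last [] _
          (fun hc => absurd (List.eq_of_mem_replicate hc) (by decide))]
        rw [hrep]
        simp only [List.length_nil, Int.toNat_natCast, List.nil_append,
          List.set_cons_zero, List.set_cons_succ]
        rw [parseBin_one]
        congr 1
        rw [show ('1' :: '0' :: List.replicate k '1')
            = ['1', '0'] ++ List.replicate k '1' from rfl,
          val2_append, val2_replicate_one]
        rw [show val2 ['1', '0'] = 2 from rfl, List.length_replicate]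
        omega
      rw [hA, hB]
      have hyval : y = 2 ^ (k + 1) - 1 := by
        rw [hdecomp, hm0]
        omega
      omega
    · -- m > 0, even : bitsN m = bitsN (m/2) ++ ['0'], and bitsN (m/2) starts with '1'
      have hm2ne : m / 2 ≠ 0 := by omega
      have hbm : bitsN m = bitsN (m / 2) ++ ['0'] := by
        rw [bitsN_eq (by omega)]
        simp [show m % 2 = 0 from hmeven]
      obtain ⟨tl, htl⟩ : ∃ tl, bitsN (m / 2) = '1' :: tl := by
        have h1 := bitsN_head hm2ne
        cases hb : bitsN (m / 2) with
        | nil => rw [hb] at h1; simp at h1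
        | cons a r =>
          rw [hb] at h1
          simp only [List.head?_cons, Option.some.injEq] at h1
          exact ⟨r, by rw [h1]⟩
      have hcore : val2 (bitsN (m / 2) ++ '1' :: '0' :: List.replicate k '1')
          = y + 2 ^ k := by
        rw [show ('1' :: '0' :: List.replicate k '1')
            = ['1', '0'] ++ List.replicate k '1' from rfl, ← List.append_assoc,
          val2_append, val2_append, val2_replicate_one, val2_bitsN]
        rw [show val2 ['1', '0'] = 2 from rfl]
        simp only [List.length_replicate, List.length_cons, List.length_nil]
        obtain ⟨q, rfl⟩ : ∃ q, m = 2 * q := ⟨m / 2, by omega⟩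
        rw [Nat.mul_div_cancel_left _ (by omega : 0 < 2)]
        obtain ⟨p, hp⟩ : ∃ p, 2 ^ k = p + 1 := ⟨2 ^ k - 1, by omega⟩
        rw [hdecomp, hpow, hp]
        have e1 : (p + 1) - 1 = p := by omega
        have e2 : 2 * (p + 1) - 1 = 2 * p + 1 := by omega
        rw [e1, e2]
        ring
      have hch : ('0' :: PySem.List.slice (PySem.Int.toBinChars0b (y:Int)) (some 2) none)
          = ('0' :: bitsN (m / 2)) ++ '0' :: List.replicate (k + 1) '1' := by
        rw [hchange, hbits, hbm]
        simp
      have hA : pvStepA (y : Int) = ((y + 2 ^ k : Nat) : Int) := by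
        rw [hA0, hch, rfind_last _ _
          (fun hc => absurd (List.eq_of_mem_replicate hc) (by decide)),
          Int.toNat_natCast, set_swap, hrep, List.set_cons_zero]
        rw [show ('0' :: bitsN (m / 2)) ++ '1' :: '0' :: List.replicate k '1'
            = '0' :: '1' :: (tl ++ '1' :: '0' :: List.replicate k '1') by rw [htl]; simp]
        rw [parseBin_zero_one]
        rw [show ('0' :: '1' :: (tl ++ '1' :: '0' :: List.replicate k '1'))
            = ['0'] ++ (('1' :: tl) ++ '1' :: '0' :: List.replicate k '1') from rfl,
          val2_append, ← htl, hcore]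
        rw [show val2 ['0'] = 0 from rfl]
        simp
      rw [hA, hB]
      push_cast
      ring

lemma fold_eq (l : List Int) (acc : List Int)
    (h : ∀ n ∈ l, (-2147483648 ≤ n ∧ n ≤ 2147483648) ∧ (0 ≤ n ∨ n % 2 = 0)) :
    l.foldl (fun answer n => answer ++ [pvStepA n]) acc
      = l.foldl (fun answer n => answer ++ [pvStepB n]) acc := by
  induction l generalizing acc with
  | nil => rfl
  | cons n l ih =>
    simp only [List.foldl_cons]
    rw [step_eq n (h n (by simp)).1 (h n (by simp)).2]
    exact ih _ (fun x hx => h x (by simp [hx]))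

-- ===== VERDICT (by name: the statement is the Claim_ definition above) =====
theorem solution_spec : Claim_equal_solution := by
  intro numbers hdom hpre
  unfold Spec_solution solution solution_alt
  apply fold_eq
  intro n hn
  refine ⟨?_, hpre n hn⟩
  have := List.all_eq_true.mp hdom n hn
  simpa [pvDomInt] using this
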